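-- pv_equiv track=rewrite | github.com/prsephton/Rover | rover.py | process_summary
-- ===== SOURCE A (Python) =====
-- def process_summary(summary, minus, plus, pos, a_max):
--     ''' Update current position using movement summaries,
--         and check for bounds of the grid being exceeded.
--     '''
--     for direction, delta in summary:
--         if direction == minus:
--             pos -= delta
--         elif direction == plus:
--             pos += delta
--         if pos < 1 or pos > a_max:
--             return -1
--     return pos
-- ===== SOURCE B (Python) =====
-- def process_summary(summary, minus, plus, pos, a_max):
--     steps = [(-d if dr == minus else d if dr == plus else 0) for dr, d in summary]
--     positions = []
--     run = pos
--     for s in steps: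
--         run += s
--         positions.append(run)
--     if any(p < 1 or p > a_max for p in positions):
--         return -1
--     return positions[-1] if positions else pos
-- ===== Notes on version B (the rewrite author's own statement) =====
-- stated objective: alternative
-- what changed: B first maps the summary to signed increments (minus wins ties), materialises the list of post-step positions as prefix sums, then checks bounds over that list and returns its last element, instead of A's single accumulator loop with early return.
import Mathlib
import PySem

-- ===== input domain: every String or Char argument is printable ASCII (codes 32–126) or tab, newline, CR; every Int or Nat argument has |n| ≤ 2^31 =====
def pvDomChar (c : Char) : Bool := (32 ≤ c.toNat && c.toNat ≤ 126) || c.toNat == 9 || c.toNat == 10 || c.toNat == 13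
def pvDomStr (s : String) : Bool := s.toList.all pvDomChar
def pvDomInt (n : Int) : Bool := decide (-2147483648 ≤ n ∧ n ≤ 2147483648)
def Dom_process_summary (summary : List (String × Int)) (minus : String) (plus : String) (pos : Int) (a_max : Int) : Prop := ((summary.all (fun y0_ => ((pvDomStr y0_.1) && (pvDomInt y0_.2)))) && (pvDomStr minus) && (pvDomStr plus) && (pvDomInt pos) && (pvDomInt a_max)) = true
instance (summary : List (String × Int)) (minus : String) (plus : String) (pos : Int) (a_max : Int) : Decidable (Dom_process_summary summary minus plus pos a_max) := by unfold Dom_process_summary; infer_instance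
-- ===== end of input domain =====

-- B: map the summary to signed increments, build post-step positions as prefix sums, then bound-check that list (alternative decomposition, same cost).


-- ===== PORT A =====
-- A's loop: update pos by the branch chain, return -1 as soon as the post-step pos is out of bounds.
def procA_loop (minus plus : String) (a_max : Int) : List (String × Int) → Int → Int
  | [], pos => pos
  | (direction, delta) :: rest, pos =>
    let pos := if direction == minus then pos - delta
               else if direction == plus then pos + delta
               else pos
    if pos < 1 || pos > a_max then -1 else procA_loop minus plus a_max rest pos

def process_summary (summary : List (String × Int)) (minus : String) (plus : String) (pos : Int) (a_max : Int) : Int :=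
  procA_loop minus plus a_max summary pos

-- ===== PORT B =====
def process_summary_alt (summary : List (String × Int)) (minus : String) (plus : String) (pos : Int) (a_max : Int) : Int :=
  let steps := summary.map (fun p => if p.1 == minus then -p.2 else if p.1 == plus then p.2 else 0)
  -- run/positions loop: positions = prefix sums of steps starting at pos
  let fr := steps.foldl (fun (st : Int × List Int) s => (st.1 + s, st.2 ++ [st.1 + s])) (pos, [])
  let positions := fr.2
  if positions.any (fun p => p < 1 || p > a_max) then -1
  else match positions.getLast? with
       | some p => p
       | none => pos

-- ===== PRECONDITION & SPEC =====
def Spec_process_summary (summary : List (String × Int)) (minus : String) (plus : String) (pos : Int) (a_max : Int) (out : Int) : Prop := out = process_summary_alt summary minus plus pos a_max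
instance (summary : List (String × Int)) (minus : String) (plus : String) (pos : Int) (a_max : Int) (out : Int) : Decidable (Spec_process_summary summary minus plus pos a_max out) := by unfold Spec_process_summary; infer_instance

-- ===== CLAIM (what is proved, stated in full; the proofs are below) =====
def Claim_equal_process_summary : Prop := ∀ (summary : List (String × Int)) (minus : String) (plus : String) (pos : Int) (a_max : Int), Dom_process_summary summary minus plus pos a_max → Spec_process_summary summary minus plus pos a_max (process_summary summary minus plus pos a_max)

-- ===== LEMMAS AND PROOFS =====

-- prefix sums of a list of increments starting from run
def pvPre : List Int → Int → List Int
  | [], _ => []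
  | s :: ss, run => (run + s) :: pvPre ss (run + s)

theorem pvFold_spec : ∀ (steps : List Int) (run : Int) (acc : List Int),
    steps.foldl (fun (st : Int × List Int) s => (st.1 + s, st.2 ++ [st.1 + s])) (run, acc)
      = (run + steps.sum, acc ++ pvPre steps run) := by
  intro steps
  induction steps with
  | nil => intro run acc; simp [pvPre]
  | cons s ss ih =>
    intro run acc
    simp only [List.foldl, List.sum_cons, pvPre, ih]
    simp [add_assoc]

theorem pvGetLast_cons_getD (l : List Int) (a d : Int) :
    ((a :: l).getLast?.getD d) = l.getLast?.getD a := by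
  cases l with
  | nil => simp
  | cons b bs =>
    rw [List.getLast?_cons_cons]
    cases h : (b :: bs).getLast? with
    | none => simp at h
    | some p => simp

theorem pvLoop_eq (minus plus : String) (a_max : Int) :
    ∀ (summary : List (String × Int)) (pos : Int),
      procA_loop minus plus a_max summary pos =
        (if (pvPre (summary.map (fun p => if p.1 == minus then -p.2 else if p.1 == plus then p.2 else 0)) pos).any
              (fun p => p < 1 || p > a_max) then -1
         else (pvPre (summary.map (fun p => if p.1 == minus then -p.2 else if p.1 == plus then p.2 else 0)) pos).getLast?.getD pos) := by
  intro summary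
  induction summary with
  | nil => intro pos; simp [procA_loop, pvPre]
  | cons hd tl ih =>
    intro pos
    obtain ⟨dr, d⟩ := hd
    have hpos : (if dr == minus then pos - d else if dr == plus then pos + d else pos)
        = pos + (if dr == minus then -d else if dr == plus then d else 0) := by
      split_ifs <;> ring
    simp only [procA_loop, List.map_cons, pvPre, hpos]
    generalize (pos + (if dr == minus then -d else if dr == plus then d else 0)) = q
    by_cases hb : (decide (q < 1) || decide (q > a_max)) = true
    · rw [if_pos hb, if_pos (by simp only [List.any_cons, hb, Bool.true_or])]
    · have hbf : (decide (q < 1) || decide (q > a_max)) = false := by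
        simpa using hb
      rw [if_neg hb, ih, List.any_cons, hbf, Bool.false_or, pvGetLast_cons_getD]

-- ===== VERDICT (by name: the statement is the Claim_ definition above) =====
theorem process_summary_spec : Claim_equal_process_summary := by
  intro summary minus plus pos a_max _
  unfold Spec_process_summary process_summary process_summary_alt
  rw [pvLoop_eq]
  simp only [pvFold_spec, List.nil_append]
  by_cases h : (pvPre (summary.map (fun p => if p.1 == minus then -p.2 else if p.1 == plus then p.2 else 0)) pos).any
      (fun p => decide (p < 1) || decide (p > a_max)) = true
  · rw [if_pos h, if_pos h]
  · rw [if_neg h, if_neg h]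
    cases hl : (pvPre (summary.map (fun p => if p.1 == minus then -p.2 else if p.1 == plus then p.2 else 0)) pos).getLast? with
    | none => rfl
    | some p => rfl
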